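-- pv_equiv track=rewrite | github.com/mgijax/goload | lib/uberonlib.py | convertExtensions
-- ===== SOURCE A (Python) =====
-- UBERON_MAPPING_MULTIPLES_ERROR = "uberon id has > 1 emapa : %s\t%s"
--
-- UBERON_MAPPING_MISSING_ERROR = "uberon id not found or missing emapa id: %s"
--
-- def convertExtensions(extensions, uberonLookup={}):
--     #
--     # Converts extensions ids
--     #
--     # 	UBERON: -> EMAPA:
--     #
--     #   Returns converted extensions
--     #   Returns list of error messages []
--     #
--
--     uberonPrefix = 'UBERON:'
--
--     errors = []
--
--     pStart = extensions.split('(')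
--     for p in pStart:
--
--         pEnd = p.split(')')
--
--         for e in pEnd:
--
--             # found uberon id
--             if e.find(uberonPrefix) >= 0:
--                 if e in uberonLookup:
--                     u = uberonLookup[e]
--                     # found > 1 emapa
--                     if len(u) > 1:
--                         errors.append(UBERON_MAPPING_MULTIPLES_ERROR % (e, str(u)))
--                     # replace UBERON id with EMAPA id
--                     else:
--                         extensions = extensions.replace(e, u[0])
--                 # did not find uberon id
--                 else:
--                     errors.append(UBERON_MAPPING_MISSING_ERROR % (e))
--
--             # else, do nothing
--
--     return extensions, errors
-- ===== SOURCE B (Python) =====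
-- UBERON_MAPPING_MULTIPLES_ERROR = "uberon id has > 1 emapa : %s\t%s"
--
-- UBERON_MAPPING_MISSING_ERROR = "uberon id not found or missing emapa id: %s"
--
-- def convertExtensions(extensions, uberonLookup={}):
--     #
--     # Same conversion, but with no split at all: a character-level scanner
--     # walks the string once, building each delimiter-bounded token in a
--     # buffer and handling it on the fly at every '(' / ')' (a trailing
--     # sentinel '(' flushes the final token).
--     #
--     errors = []
--     result = extensions
--     buf = []
--
--     for c in extensions + '(':
--         if c in '()':
--             e = ''.join(buf)
--             buf = []
--             if 'UBERON:' in e: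
--                 if e in uberonLookup:
--                     u = uberonLookup[e]
--                     if len(u) > 1:
--                         errors.append(UBERON_MAPPING_MULTIPLES_ERROR % (e, str(u)))
--                     else:
--                         result = result.replace(e, u[0])
--                 else:
--                     errors.append(UBERON_MAPPING_MISSING_ERROR % (e))
--         else:
--             buf.append(c)
--
--     return result, errors
-- ===== Notes on version B (the rewrite author's own statement) =====
-- stated objective: alternative
-- what changed: B drops A's nested split('(')/split(')') passes entirely and instead walks the string once with a character-level scanner that accumulates each delimiter-bounded token in a buffer and handles it in place at every parenthesis (a sentinel '(' flushes the last token).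
-- outside the precondition, e.g. on convertExtensions('x(UBERON:1)', {'UBERON:1': []}): A raises IndexError, B raises IndexError
import Mathlib
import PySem

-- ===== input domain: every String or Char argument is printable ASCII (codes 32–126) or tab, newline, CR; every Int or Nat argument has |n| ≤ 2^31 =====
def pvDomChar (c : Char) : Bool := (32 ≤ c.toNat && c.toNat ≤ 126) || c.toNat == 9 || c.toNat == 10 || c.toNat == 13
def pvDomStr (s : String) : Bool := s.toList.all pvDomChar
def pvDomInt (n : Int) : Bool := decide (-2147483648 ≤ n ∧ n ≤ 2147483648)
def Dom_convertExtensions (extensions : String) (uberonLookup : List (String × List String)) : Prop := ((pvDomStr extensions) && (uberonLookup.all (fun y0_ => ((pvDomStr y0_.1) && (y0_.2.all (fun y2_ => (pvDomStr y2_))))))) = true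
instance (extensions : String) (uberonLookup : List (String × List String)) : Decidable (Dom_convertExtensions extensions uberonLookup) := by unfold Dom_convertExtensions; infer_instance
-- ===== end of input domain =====

-- B replaces A's nested split('(')/split(')') passes by a single character-level
-- scanner that builds and handles each delimiter-bounded token on the fly (alternative).

-- Shared message formatting (Python's '%s' substitution; str(u) is Python's list-of-str repr)
def pvReprChar (q : Char) (c : Char) : List Char :=
  if c = '\\' then ['\\', '\\']
  else if c = '\t' then ['\\', 't']
  else if c = '\n' then ['\\', 'n']
  else if c = '\r' then ['\\', 'r']
  else if c = q then ['\\', q]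
  else [c]

-- Python repr of a str (exact on the printable-ASCII + tab/newline/CR domain)
def pvReprStr (s : List Char) : List Char :=
  let q : Char := if '\'' ∈ s ∧ '"' ∉ s then '"' else '\''
  q :: (s.flatMap (pvReprChar q) ++ [q])

-- Python str(u) for u : list[str]
def pvStrList (u : List String) : List Char :=
  '[' :: (PySem.Chars.join ", ".toList (u.map (fun s => pvReprStr s.toList)) ++ [']'])

-- UBERON_MAPPING_MISSING_ERROR % (e)
def pvMissMsg (e : List Char) : String :=
  String.ofList ("uberon id not found or missing emapa id: ".toList ++ e)

-- UBERON_MAPPING_MULTIPLES_ERROR % (e, str(u))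
def pvMultMsg (e : List Char) (u : List String) : String :=
  String.ofList ("uberon id has > 1 emapa : ".toList ++ e ++ '\t' :: pvStrList u)

-- ===== PORT A =====
def convertExtensions (extensions : String) (uberonLookup : List (String × List String)) : String × List String :=
  let uberonPrefix := "UBERON:".toList
  let pStart := PySem.Chars.splitOn extensions.toList ['(']
  let r := pStart.foldl (fun st p =>
      let pEnd := PySem.Chars.splitOn p [')']
      pEnd.foldl (fun st e =>
        if 0 ≤ PySem.Chars.find e uberonPrefix then
          match uberonLookup.find? (fun kv => kv.1.toList == e) with
          | some kv =>
            if 1 < kv.2.length then (st.1, st.2 ++ [pvMultMsg e kv.2])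
            else (PySem.Chars.replace st.1 e (PySem.List.pyGetD kv.2 0 "").toList, st.2)
          | none => (st.1, st.2 ++ [pvMissMsg e])
        else st) st)
    (extensions.toList, ([] : List String))
  (String.ofList r.1, r.2)

-- ===== PORT B =====
-- Source B's scanner: the buffer is kept in reverse (Python appends at the end and
-- joins), so the flushed token e is acc.1.reverse; the sentinel '(' is appended.
def convertExtensions_alt (extensions : String) (uberonLookup : List (String × List String)) : String × List String :=
  let r := (extensions.toList ++ ['(']).foldl
    (fun (acc : List Char × (List Char × List String)) c =>
      if c = '(' ∨ c = ')' then
        (([] : List Char),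
          (fun (st : List Char × List String) (e : List Char) =>
            if PySem.Chars.isIn "UBERON:".toList e then
              match uberonLookup.find? (fun kv => kv.1.toList == e) with
              | some kv =>
                if 1 < kv.2.length then (st.1, st.2 ++ [pvMultMsg e kv.2])
                else (PySem.Chars.replace st.1 e (PySem.List.pyGetD kv.2 0 "").toList, st.2)
              | none => (st.1, st.2 ++ [pvMissMsg e])
            else st) acc.2 acc.1.reverse)
      else (c :: acc.1, acc.2))
    (([] : List Char), (extensions.toList, ([] : List String)))
  (String.ofList r.2.1, r.2.2)

-- the delimiter-bounded tokens of a string (used by Pre_ only)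
def pvTokens : List Char → List (List Char)
  | [] => [[]]
  | c :: t =>
    if c = '(' ∨ c = ')' then [] :: pvTokens t
    else match pvTokens t with
         | [] => [[c]]
         | r :: rs => (c :: r) :: rs

-- ===== PRECONDITION & SPEC =====
-- A (and B alike) raises IndexError via u[0] exactly when some parenthesis-delimited
-- token carrying 'UBERON:' is mapped by uberonLookup to an empty list; Pre_ excludes exactly those inputs.
def Pre_convertExtensions (extensions : String) (uberonLookup : List (String × List String)) : Prop :=
  ∀ e ∈ pvTokens extensions.toList,
    PySem.Chars.isIn "UBERON:".toList e = true →
    (uberonLookup.find? (fun kv => kv.1.toList == e)).map Prod.snd ≠ some []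
instance (extensions : String) (uberonLookup : List (String × List String)) : Decidable (Pre_convertExtensions extensions uberonLookup) := by unfold Pre_convertExtensions; infer_instance

def pvWitness_convertExtensions : String × (List (String × List String)) :=
  ("x(UBERON:1)", [("UBERON:1", ["EMAPA:9"])])

def Spec_convertExtensions (extensions : String) (uberonLookup : List (String × List String)) (out : String × List String) : Prop := out = convertExtensions_alt extensions uberonLookup
instance (extensions : String) (uberonLookup : List (String × List String)) (out : String × List String) : Decidable (Spec_convertExtensions extensions uberonLookup out) := by unfold Spec_convertExtensions; infer_instance

-- ===== CLAIM (what is proved, stated in full; the proofs are below) =====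
def Claim_equal_convertExtensions : Prop := ∀ (extensions : String) (uberonLookup : List (String × List String)), Dom_convertExtensions extensions uberonLookup → Pre_convertExtensions extensions uberonLookup → Spec_convertExtensions extensions uberonLookup (convertExtensions extensions uberonLookup)

-- ===== LEMMAS AND PROOFS =====

-- splitting on one delimiter character, structurally
def pvSplitChar (d : Char) : List Char → List (List Char)
  | [] => [[]]
  | c :: t =>
    if c = d then [] :: pvSplitChar d t
    else match pvSplitChar d t with
         | [] => [[c]]
         | r :: rs => (c :: r) :: rs

theorem pvSplitChar_ne_nil (d : Char) (l : List Char) : pvSplitChar d l ≠ [] := by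
  cases l with
  | nil => simp [pvSplitChar]
  | cons c t =>
    simp only [pvSplitChar]
    split_ifs
    · simp
    · cases pvSplitChar d t <;> simp

theorem pvTokens_ne_nil (l : List Char) : pvTokens l ≠ [] := by
  cases l with
  | nil => simp [pvTokens]
  | cons c t =>
    simp only [pvTokens]
    split_ifs
    · simp
    · cases pvTokens t <;> simp

theorem pvSplitOnGo_char (d : Char) : ∀ (fuel : Nat) (l cur : List Char) (acc : List (List Char)),
    l.length < fuel →
    PySem.Chars.splitOn.go [d] fuel l cur acc =
      acc.reverse ++ (match pvSplitChar d l with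
                      | [] => [cur.reverse]
                      | r :: rs => (cur.reverse ++ r) :: rs) := by
  intro fuel
  induction fuel with
  | zero => intro l cur acc h; omega
  | succ n ih =>
    intro l cur acc h
    cases l with
    | nil => simp [PySem.Chars.splitOn.go, pvSplitChar]
    | cons c t =>
      simp only [PySem.Chars.splitOn.go, List.isPrefixOf]
      by_cases hc : c = d
      · subst hc
        rw [if_pos (by simp)]
        rw [show List.drop [c].length (c :: t) = t from rfl]
        rw [ih t [] (cur.reverse :: acc) (by simpa using Nat.lt_of_succ_lt_succ h)]
        simp only [pvSplitChar]
        cases hst : pvSplitChar c t with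
        | nil => exact absurd hst (pvSplitChar_ne_nil c t)
        | cons r rs => simp
      · rw [if_neg (by simp; intro h'; exact hc h'.symm)]
        rw [ih t (c :: cur) acc (by simpa using Nat.lt_of_succ_lt_succ h)]
        simp only [pvSplitChar, if_neg hc]
        cases hst : pvSplitChar d t with
        | nil => exact absurd hst (pvSplitChar_ne_nil d t)
        | cons r rs => simp

theorem pvSplitOn_char (d : Char) (l : List Char) :
    PySem.Chars.splitOn l [d] = pvSplitChar d l := by
  simp only [PySem.Chars.splitOn]
  rw [pvSplitOnGo_char d (l.length + 1) l [] [] (by omega)]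
  cases hst : pvSplitChar d l with
  | nil => exact absurd hst (pvSplitChar_ne_nil d l)
  | cons r rs => simp

-- A's two staged splits produce exactly the scanner's token stream
theorem pvFlat : ∀ (cs : List Char),
    (pvSplitChar '(' cs).flatMap (pvSplitChar ')') = pvTokens cs := by
  intro cs
  induction cs with
  | nil => simp [pvSplitChar, pvTokens]
  | cons c t ih =>
    by_cases h1 : c = '('
    · subst h1
      simp only [pvSplitChar, pvTokens]
      rw [← ih]
      simp [pvSplitChar]
    · by_cases h2 : c = ')'
      · subst h2
        simp only [pvSplitChar, pvTokens, if_neg h1]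
        cases hst : pvSplitChar '(' t with
        | nil => exact absurd hst (pvSplitChar_ne_nil _ t)
        | cons r rs =>
          simp only [List.flatMap_cons, pvSplitChar]
          rw [← ih, hst]
          simp [List.flatMap_cons]
      · simp only [pvSplitChar, pvTokens, if_neg h1,
          if_neg (by simp [h1, h2] : ¬ (c = '(' ∨ c = ')'))]
        cases hst : pvSplitChar '(' t with
        | nil => exact absurd hst (pvSplitChar_ne_nil _ t)
        | cons r rs =>
          simp only [List.flatMap_cons]
          rw [← ih, hst]
          simp only [List.flatMap_cons]
          cases hsr : pvSplitChar ')' r with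
          | nil => exact absurd hsr (pvSplitChar_ne_nil _ r)
          | cons q qs =>
            simp only [pvSplitChar, if_neg h2, hsr]
            cases qs <;> simp

-- the scanner fold is a fold of the flush handler over the token stream
theorem pvScan (f : (List Char × List String) → List Char → (List Char × List String)) :
    ∀ (cs buf : List Char) (st : List Char × List String),
    ((cs ++ ['(']).foldl
      (fun (acc : List Char × (List Char × List String)) c =>
        if c = '(' ∨ c = ')' then (([] : List Char), f acc.2 acc.1.reverse)
        else (c :: acc.1, acc.2))
      (buf, st)).2
    = List.foldl f st (match pvTokens cs with
                       | [] => [buf.reverse]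
                       | r :: rs => (buf.reverse ++ r) :: rs) := by
  intro cs
  induction cs with
  | nil => intro buf st; simp [pvTokens]
  | cons c t ih =>
    intro buf st
    by_cases hd : c = '(' ∨ c = ')'
    · simp only [List.cons_append, List.foldl_cons, if_pos hd, pvTokens, ih]
      cases hst : pvTokens t with
      | nil => exact absurd hst (pvTokens_ne_nil t)
      | cons r rs => simp
    · simp only [List.cons_append, List.foldl_cons, if_neg hd, pvTokens, ih]
      cases hst : pvTokens t with
      | nil => exact absurd hst (pvTokens_ne_nil t)
      | cons r rs => simp

-- A's guard '0 ≤ e.find(pref)' is B's membership test 'pref in e'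
theorem pvGuard_iff (e : List Char) :
    (PySem.Chars.isIn "UBERON:".toList e = true) ↔ 0 ≤ PySem.Chars.find e "UBERON:".toList := by
  rw [PySem.Chars.isIn_iff_infix, ← PySem.Chars.find_nonneg_iff]

theorem convertExtensions_spec : Claim_equal_convertExtensions := by
  intro extensions uberonLookup _ _
  unfold Spec_convertExtensions convertExtensions convertExtensions_alt
  simp only []
  rw [pvScan (fun (st : List Char × List String) (e : List Char) =>
        if PySem.Chars.isIn "UBERON:".toList e then
          match uberonLookup.find? (fun kv => kv.1.toList == e) with
          | some kv =>
            if 1 < kv.2.length then (st.1, st.2 ++ [pvMultMsg e kv.2])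
            else (PySem.Chars.replace st.1 e (PySem.List.pyGetD kv.2 0 "").toList, st.2)
          | none => (st.1, st.2 ++ [pvMissMsg e])
        else st) extensions.toList [] (extensions.toList, [])]
  -- B's membership guard is A's find-based guard
  have hstep : (fun (st : List Char × List String) (e : List Char) =>
      if PySem.Chars.isIn "UBERON:".toList e then
        match uberonLookup.find? (fun kv => kv.1.toList == e) with
        | some kv =>
          if 1 < kv.2.length then (st.1, st.2 ++ [pvMultMsg e kv.2])
          else (PySem.Chars.replace st.1 e (PySem.List.pyGetD kv.2 0 "").toList, st.2)
        | none => (st.1, st.2 ++ [pvMissMsg e])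
      else st)
      = (fun (st : List Char × List String) (e : List Char) =>
      if 0 ≤ PySem.Chars.find e "UBERON:".toList then
        match uberonLookup.find? (fun kv => kv.1.toList == e) with
        | some kv =>
          if 1 < kv.2.length then (st.1, st.2 ++ [pvMultMsg e kv.2])
          else (PySem.Chars.replace st.1 e (PySem.List.pyGetD kv.2 0 "").toList, st.2)
        | none => (st.1, st.2 ++ [pvMissMsg e])
      else st) := by
    funext st e
    by_cases hg : 0 ≤ PySem.Chars.find e "UBERON:".toList
    · rw [if_pos hg, if_pos ((pvGuard_iff e).mpr hg)]
    · rw [if_neg hg, if_neg (fun hh => hg ((pvGuard_iff e).mp hh))]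
  rw [hstep]
  -- A's nested fold is a fold over the flattened token stream
  rw [show (fun (st : List Char × List String) (p : List Char) =>
        (PySem.Chars.splitOn p [')']).foldl (fun st e =>
          if 0 ≤ PySem.Chars.find e "UBERON:".toList then
            match uberonLookup.find? (fun kv => kv.1.toList == e) with
            | some kv =>
              if 1 < kv.2.length then (st.1, st.2 ++ [pvMultMsg e kv.2])
              else (PySem.Chars.replace st.1 e (PySem.List.pyGetD kv.2 0 "").toList, st.2)
            | none => (st.1, st.2 ++ [pvMissMsg e])
          else st) st)
      = (fun (st : List Char × List String) (p : List Char) =>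
        (pvSplitChar ')' p).foldl (fun st e =>
          if 0 ≤ PySem.Chars.find e "UBERON:".toList then
            match uberonLookup.find? (fun kv => kv.1.toList == e) with
            | some kv =>
              if 1 < kv.2.length then (st.1, st.2 ++ [pvMultMsg e kv.2])
              else (PySem.Chars.replace st.1 e (PySem.List.pyGetD kv.2 0 "").toList, st.2)
            | none => (st.1, st.2 ++ [pvMissMsg e])
          else st) st)
      from by funext st p; rw [pvSplitOn_char]]
  rw [pvSplitOn_char, ← List.foldl_map, ← List.foldl_flatten, ← List.flatMap_def, pvFlat]
  cases hst : pvTokens extensions.toList with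
  | nil => exact absurd hst (pvTokens_ne_nil _)
  | cons r rs => simp
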